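-- pv_equiv track=rewrite | github.com/LeonardoCMelo/Exercicios-Aulas-Programacao-Computadores | Aula13/Aula13-Exercicio03_3_1.py | exercicio_3_3_1
-- ===== SOURCE A (Python) =====
-- import math
--
-- def exercicio_3_3_1(ini, fim):
--     resultado = []
--     limite_divisor = int(math.sqrt(fim))
--
--     for n in range(ini, fim + 1):
--         for d in range(2, limite_divisor + 1):
--             if n % d == 0:
--                 resultado.append(n)
--                 break
--
--     return resultado
-- ===== SOURCE B (Python) =====
-- import math
--
-- def exercicio_3_3_1(ini, fim):
--     # Sieve: for each candidate divisor d, mark every multiple of d in [ini, fim],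
--     # then return the marked numbers in ascending order.
--     limite = math.isqrt(fim)
--     marcados = set()
--     for d in range(2, limite + 1):
--         inicio = -((-ini) // d) * d  # smallest multiple of d that is >= ini
--         marcados.update(range(inicio, fim + 1, d))
--     return sorted(marcados)
-- ===== Notes on version B (the rewrite author's own statement) =====
-- stated objective: faster
-- what changed: Replaces the per-number trial-division scan (for each n in [ini,fim], try every d up to sqrt(fim)) by a sieve: for each d up to sqrt(fim) mark all multiples of d in the range at once via a stepped range, then sort the marked set.
import Mathlib
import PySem

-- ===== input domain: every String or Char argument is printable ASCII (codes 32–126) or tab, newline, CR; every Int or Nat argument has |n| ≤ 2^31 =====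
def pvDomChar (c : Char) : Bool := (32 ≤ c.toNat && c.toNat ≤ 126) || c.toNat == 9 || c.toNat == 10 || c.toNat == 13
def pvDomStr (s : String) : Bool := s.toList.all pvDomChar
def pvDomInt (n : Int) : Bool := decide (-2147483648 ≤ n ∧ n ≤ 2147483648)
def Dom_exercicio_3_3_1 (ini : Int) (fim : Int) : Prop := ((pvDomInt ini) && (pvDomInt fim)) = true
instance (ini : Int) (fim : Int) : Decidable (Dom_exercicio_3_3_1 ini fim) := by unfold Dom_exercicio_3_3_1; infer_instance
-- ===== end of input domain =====

-- B replaces A's per-number trial-division scan by a sieve (mark multiples of each d ≤ √fim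
-- with stepped ranges, then sort the marked set); equal output proved on Pre_ (0 ≤ fim).


-- ===== PORT A =====
-- inner loop 'for d in range(2, limite+1): if n % d == 0: resultado.append(n); break'
-- (the break = stop at the first divisor found; returns whether one was found)
def pvScan (n : Int) : List Int → Bool
  | [] => false
  | d :: rest => if PySem.Int.mod n d = 0 then true else pvScan n rest

def exercicio_3_3_1 (ini : Int) (fim : Int) : List Int :=
  -- int(math.sqrt(fim)): exact as Nat.sqrt on the domain 0 ≤ fim ≤ 2^31 (Pre_ excludes fim < 0, where math.sqrt raises)
  let limite_divisor : Int := (Nat.sqrt fim.toNat : Int)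
  (PySem.List.pyRange ini (fim + 1) 1).foldl
    (fun resultado n =>
      if pvScan n (PySem.List.pyRange 2 (limite_divisor + 1) 1) then resultado ++ [n]
      else resultado) []

-- ===== PORT B =====
def exercicio_3_3_1_alt (ini : Int) (fim : Int) : List Int :=
  -- math.isqrt(fim): Nat.sqrt (raises for fim < 0, excluded by Pre_)
  let limite : Int := (Nat.sqrt fim.toNat : Int)
  let marcados : PySem.Set Int :=
    (PySem.List.pyRange 2 (limite + 1) 1).foldl
      (fun marcados d =>
        let inicio := -(PySem.Int.floordiv (-ini) d) * d   -- smallest multiple of d ≥ ini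
        PySem.Set.update marcados (PySem.List.pyRange inicio (fim + 1) d))
      PySem.Set.empty
  PySem.List.sorted marcados (fun x => x)

-- ===== PRECONDITION & SPEC =====
-- Pre_ excludes exactly fim < 0, where math.sqrt(fim) (A) and math.isqrt(fim) (B) raise ValueError.
def Pre_exercicio_3_3_1 (ini : Int) (fim : Int) : Prop := 0 ≤ fim
instance (ini : Int) (fim : Int) : Decidable (Pre_exercicio_3_3_1 ini fim) := by unfold Pre_exercicio_3_3_1; infer_instance
def pvWitness_exercicio_3_3_1 : Int × Int := (-10, 30)

def Spec_exercicio_3_3_1 (ini : Int) (fim : Int) (out : List Int) : Prop := out = exercicio_3_3_1_alt ini fim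
instance (ini : Int) (fim : Int) (out : List Int) : Decidable (Spec_exercicio_3_3_1 ini fim out) := by unfold Spec_exercicio_3_3_1; infer_instance

-- ===== CLAIM (what is proved, stated in full; the proofs are below) =====
def Claim_equal_exercicio_3_3_1 : Prop := ∀ (ini : Int) (fim : Int), Dom_exercicio_3_3_1 ini fim → Pre_exercicio_3_3_1 ini fim → Spec_exercicio_3_3_1 ini fim (exercicio_3_3_1 ini fim)

-- ===== LEMMAS AND PROOFS =====

-- the break-scan finds a divisor iff one exists in the scanned list
theorem pvScan_iff (n : Int) (L : List Int) : pvScan n L = true ↔ ∃ d ∈ L, d ∣ n := by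
  induction L with
  | nil => simp [pvScan]
  | cons d rest ih =>
    simp only [pvScan, List.mem_cons]
    split_ifs with h
    · simp only [true_iff]
      exact ⟨d, Or.inl rfl, (PySem.Int.mod_eq_zero_iff_dvd n d).mp h⟩
    · rw [ih]
      constructor
      · rintro ⟨e, he, hd⟩; exact ⟨e, Or.inr he, hd⟩
      · rintro ⟨e, he, hd⟩
        rcases he with rfl | he
        · exact absurd ((PySem.Int.mod_eq_zero_iff_dvd n e).mpr hd) h
        · exact ⟨e, he, hd⟩

-- A is the ascending filter of the range by "has a divisor ≤ limite"
theorem portA_eq_filter (ini fim lim : Int) :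
    (PySem.List.pyRange ini (fim + 1) 1).foldl
      (fun resultado n =>
        if pvScan n (PySem.List.pyRange 2 (lim + 1) 1) then resultado ++ [n]
        else resultado) []
    = (PySem.List.pyRange ini (fim + 1) 1).filter
        (fun n => pvScan n (PySem.List.pyRange 2 (lim + 1) 1)) := by
  rw [PySem.List.foldl_append_if (fun n => pvScan n (PySem.List.pyRange 2 (lim + 1) 1)) (fun n => n)]
  simp

-- membership in the stepped range of multiples of d inside [ini, fim]
theorem mem_multiples (ini fim d x : Int) (hd : 0 < d) :
    x ∈ PySem.List.pyRange (-(PySem.Int.floordiv (-ini) d) * d) (fim + 1) d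
      ↔ ini ≤ x ∧ x < fim + 1 ∧ d ∣ x := by
  set q : Int := -(PySem.Int.floordiv (-ini) d) with hq
  have hb : (q - 1) * d < ini ∧ ini ≤ q * d :=
    (PySem.Int.neg_floordiv_neg_eq_iff_of_pos hd).mp hq.symm
  rw [PySem.List.mem_pyRange_iff_of_pos hd x]
  constructor
  · rintro ⟨h1, h2, k, hk⟩
    refine ⟨le_trans hb.2 h1, h2, ?_⟩
    exact ⟨q + k, by linarith [hk]⟩
  · rintro ⟨h1, h2, k, hk⟩
    refine ⟨?_, h2, ⟨k - q, by linarith [hk]⟩⟩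
    -- x ≥ ini, d ∣ x, and q*d is the least multiple of d that is ≥ ini, so x ≥ q*d
    have hgt : d * (-1) < d * (k - q) := by nlinarith [hb.1, hk]
    have hk' : -1 < k - q := lt_of_mul_lt_mul_left hgt (le_of_lt hd)
    have : 0 ≤ d * (k - q) := mul_nonneg (le_of_lt hd) (by omega)
    nlinarith [hk]

-- membership in the sieve's fold over the divisors
theorem mem_sieve_fold (ini fim : Int) (L : List Int) (s : PySem.Set Int) (x : Int) :
    (x ∈ L.foldl
        (fun marcados d =>
          PySem.Set.update marcados (PySem.List.pyRange (-(PySem.Int.floordiv (-ini) d) * d) (fim + 1) d)) s)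
      ↔ x ∈ s ∨ ∃ d ∈ L, x ∈ PySem.List.pyRange (-(PySem.Int.floordiv (-ini) d) * d) (fim + 1) d := by
  induction L generalizing s with
  | nil => simp
  | cons d rest ih =>
    simp only [List.foldl_cons, ih, PySem.Set.mem_update, List.mem_cons]
    constructor
    · rintro ((h | h) | ⟨e, he, hx⟩)
      · exact Or.inl h
      · exact Or.inr ⟨d, Or.inl rfl, h⟩
      · exact Or.inr ⟨e, Or.inr he, hx⟩
    · rintro (h | ⟨e, (rfl | he), hx⟩)
      · exact Or.inl (Or.inl h)
      · exact Or.inl (Or.inr hx)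
      · exact Or.inr ⟨e, he, hx⟩

-- the sieve's fold keeps the set duplicate-free
theorem nodup_sieve_fold (ini fim : Int) (L : List Int) (s : PySem.Set Int) (hs : s.Nodup) :
    (L.foldl
        (fun marcados d =>
          PySem.Set.update marcados (PySem.List.pyRange (-(PySem.Int.floordiv (-ini) d) * d) (fim + 1) d)) s).Nodup := by
  induction L generalizing s with
  | nil => exact hs
  | cons d rest ih => exact ih _ (PySem.Set.nodup_update _ _ hs)

theorem exercicio_3_3_1_spec0 (ini fim : Int) :
    exercicio_3_3_1 ini fim = exercicio_3_3_1_alt ini fim := by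
  unfold exercicio_3_3_1 exercicio_3_3_1_alt
  set lim : Int := (Nat.sqrt fim.toNat : Int) with hlim
  simp only []
  rw [portA_eq_filter]
  set F : List Int := (PySem.List.pyRange ini (fim + 1) 1).filter
      (fun n => pvScan n (PySem.List.pyRange 2 (lim + 1) 1)) with hF
  set M : PySem.Set Int := (PySem.List.pyRange 2 (lim + 1) 1).foldl
      (fun marcados d =>
        PySem.Set.update marcados (PySem.List.pyRange (-(PySem.Int.floordiv (-ini) d) * d) (fim + 1) d))
      PySem.Set.empty with hM
  have hFpw : F.Pairwise (· < ·) :=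
    List.Pairwise.filter _ (PySem.List.pairwise_lt_pyRange_one ini (fim + 1))
  have hFnd : F.Nodup := hFpw.imp (fun h => ne_of_lt h)
  have hMnd : M.Nodup := nodup_sieve_fold ini fim _ _ (by simp [PySem.Set.empty])
  have hmem : ∀ x, x ∈ F ↔ x ∈ M := by
    intro x
    rw [hF, List.mem_filter, hM, mem_sieve_fold]
    simp only [PySem.Set.empty, List.not_mem_nil, false_or]
    rw [PySem.List.mem_pyRange_one, pvScan_iff]
    constructor
    · rintro ⟨⟨h1, h2⟩, d, hd, hdvd⟩
      have hd2 : 2 ≤ d := (PySem.List.mem_pyRange_one.mp hd).1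
      exact ⟨d, hd, (mem_multiples ini fim d x (by omega)).mpr ⟨h1, h2, hdvd⟩⟩
    · rintro ⟨d, hd, hx⟩
      have hd2 : 2 ≤ d := (PySem.List.mem_pyRange_one.mp hd).1
      obtain ⟨h1, h2, hdvd⟩ := (mem_multiples ini fim d x (by omega)).mp hx
      exact ⟨⟨h1, h2⟩, d, hd, hdvd⟩
  have hperm : F.Perm M := (List.perm_ext_iff_of_nodup hFnd hMnd).mpr hmem
  exact (PySem.List.sorted_eq_of_perm_of_pairwise_lt M F (fun x => x) hperm hFpw).symm

-- ===== VERDICT (by name: the statement is the Claim_ definition above) =====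
theorem exercicio_3_3_1_spec : Claim_equal_exercicio_3_3_1 := by
  intro ini fim _ _
  unfold Spec_exercicio_3_3_1
  exact exercicio_3_3_1_spec0 ini fim
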